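-- pv_equiv track=rewrite | github.com/Ashiq-am/Path-of-Python | 3.Data Types/Arrays Set 1 and Set 2/Prefix/Count of indices in Array having all prefix elements less than all in suffix/Count of indices in Array having all prefix elements less than all in suffix.py | countSortedPoints
-- ===== SOURCE A (Python) =====
-- INT_MIN = -2147483648
--
-- INT_MAX = 2147483647
--
-- def countSortedPoints(arr, N):
--
-- 	left = [0 for i in range(N)]
-- 	right = [0 for i in range(N)]
--
-- 	# Initialize the variables
-- 	Min = INT_MAX
-- 	Max = INT_MIN
-- 	Count = 0
--
-- 	# Make Maximum array
-- 	for i in range(N):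
--
-- 		Max = max(arr[i], Max)
-- 		left[i] = Max
--
-- 			# Make Minimum array
-- 	for i in range(N - 1, -1, -1):
--
-- 		Min = min(arr[i], Min)
-- 		right[i] = Min
--
-- 	# Count of sorted points
-- 	for i in range(0, N - 1):
-- 		if (left[i] <= right[i + 1]):
-- 			Count += 1
--
-- 			# Return count of sorted points
-- 	return Count
-- ===== SOURCE B (Python) =====
-- INT_MIN = -2147483648
--
-- INT_MAX = 2147483647
--
-- def countSortedPoints(arr, N):
--     # Direct specification as a brute-force double quantifier: a split index i
--     # is counted iff every prefix element is <= every suffix element.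
--     # No auxiliary arrays, no running extrema.
--     return sum(1 for i in range(N - 1)
--                if all(x <= y for x in arr[:i + 1] for y in arr[i + 1:N]))
-- ===== Notes on version B (the rewrite author's own statement) =====
-- stated objective: alternative
-- what changed: B replaces A's three scan passes over prefix-max and suffix-min tables by a brute-force double quantifier: it counts the split indices by directly testing every prefix element against every suffix element, with no auxiliary arrays and no running extrema.
-- intended difference: On inputs where the last of the first N elements is 2147483648 (above A's INT_MAX sentinel 2147483647) and 2147483648 also occurs earlier among those elements, A's suffix-min array is capped at INT_MAX so A silently undercounts the valid splits, while B returns the intended count. — e.g. on countSortedPoints([2147483648, 2147483648], 2): A returns 0, B returns 1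
import Mathlib
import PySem

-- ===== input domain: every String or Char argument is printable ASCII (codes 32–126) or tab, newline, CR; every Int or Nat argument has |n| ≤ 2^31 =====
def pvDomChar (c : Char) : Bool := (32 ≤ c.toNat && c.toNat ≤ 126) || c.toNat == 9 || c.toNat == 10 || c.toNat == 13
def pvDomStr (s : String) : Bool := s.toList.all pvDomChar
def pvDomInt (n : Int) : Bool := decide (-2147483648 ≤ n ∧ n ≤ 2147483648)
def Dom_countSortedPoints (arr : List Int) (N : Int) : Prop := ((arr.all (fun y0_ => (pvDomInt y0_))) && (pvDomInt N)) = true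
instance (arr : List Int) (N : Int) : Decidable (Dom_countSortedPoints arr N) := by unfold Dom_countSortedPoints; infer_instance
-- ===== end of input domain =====

-- B replaces A's three scan passes (prefix-max table, suffix-min table, compare)
-- by a brute-force double quantifier testing every prefix element against every
-- suffix element: an alternative, specification-shaped algorithm with no tables.

-- ===== PORT A =====
def pvINT_MIN : Int := -2147483648
def pvINT_MAX : Int := 2147483647

def countSortedPoints (arr : List Int) (N : Int) : Int :=
  let left : List Int := (PySem.List.pyRange 0 N 1).map (fun _ => 0)
  let right : List Int := (PySem.List.pyRange 0 N 1).map (fun _ => 0)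
  -- for i in range(N): Max = max(arr[i], Max); left[i] = Max
  let s1 := (PySem.List.pyRange 0 N 1).foldl
    (fun (s : Int × List Int) i =>
      let Max := max (PySem.List.pyGetD arr i 0) s.1
      (Max, PySem.List.pySetD s.2 i Max)) (pvINT_MIN, left)
  -- for i in range(N-1, -1, -1): Min = min(arr[i], Min); right[i] = Min
  let s2 := (PySem.List.pyRange (N - 1) (-1) (-1)).foldl
    (fun (s : Int × List Int) i =>
      let Min := min (PySem.List.pyGetD arr i 0) s.1
      (Min, PySem.List.pySetD s.2 i Min)) (pvINT_MAX, right)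
  -- for i in range(0, N-1): if left[i] <= right[i+1]: Count += 1
  (PySem.List.pyRange 0 (N - 1) 1).foldl
    (fun (Count : Int) i =>
      if PySem.List.pyGetD s1.2 i 0 ≤ PySem.List.pyGetD s2.2 (i + 1) 0 then Count + 1
      else Count) 0

-- ===== PORT B =====
-- sum(1 for i in range(N-1) if all(x <= y for x in arr[:i+1] for y in arr[i+1:N]))
def countSortedPoints_alt (arr : List Int) (N : Int) : Int :=
  (PySem.List.pyRange 0 (N - 1) 1).foldl
    (fun (c : Int) i =>
      if (PySem.List.slice arr none (some (i + 1))).all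
           (fun x => (PySem.List.slice arr (some (i + 1)) (some N)).all
             (fun y => decide (x ≤ y))) then c + 1 else c) 0

-- ===== PRECONDITION & SPEC =====
-- Pre_ excludes exactly the inputs where Python A raises IndexError (N > len(arr));
-- for N ≤ len(arr), including negative N, A returns normally.
def Pre_countSortedPoints (arr : List Int) (N : Int) : Prop := N ≤ (arr.length : Int)
instance (arr : List Int) (N : Int) : Decidable (Pre_countSortedPoints arr N) := by
  unfold Pre_countSortedPoints; infer_instance
def pvWitness_countSortedPoints : List Int × Int := ([3, 1, 4, 5], 4)

-- On inputs where the last of the first N elements is 2147483648 (above A's INT_MAX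
-- sentinel) and 2147483648 also occurs earlier among the first N elements, A's capped
-- suffix-min misses valid splits and A undercounts, while B returns the intended count.
def D_countSortedPoints (arr : List Int) (N : Int) : Prop :=
  2 ≤ N ∧ (arr.take N.toNat).drop (N.toNat - 1) = [2147483648] ∧
    2147483648 ∈ arr.take (N.toNat - 1)
instance (arr : List Int) (N : Int) : Decidable (D_countSortedPoints arr N) := by
  unfold D_countSortedPoints; infer_instance

def Spec_countSortedPoints (arr : List Int) (N : Int) (out : Int) : Prop :=
  ¬ D_countSortedPoints arr N → out = countSortedPoints_alt arr N
instance (arr : List Int) (N : Int) (out : Int) : Decidable (Spec_countSortedPoints arr N out) := by unfold Spec_countSortedPoints; infer_instance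

def pvDiffWitness_countSortedPoints : List Int × Int := ([2147483648, 2147483648], 2)
def pvDiffWitnessOut_countSortedPoints : Int × Int := (0, 1)

-- ===== CLAIM (what is proved, stated in full; the proofs are below) =====
def Claim_unchanged_countSortedPoints : Prop := ∀ (arr : List Int) (N : Int), Dom_countSortedPoints arr N → Pre_countSortedPoints arr N → Spec_countSortedPoints arr N (countSortedPoints arr N)
def Claim_changed_countSortedPoints : Prop := Dom_countSortedPoints (pvDiffWitness_countSortedPoints.1) (pvDiffWitness_countSortedPoints.2) ∧ Pre_countSortedPoints (pvDiffWitness_countSortedPoints.1) (pvDiffWitness_countSortedPoints.2) ∧ D_countSortedPoints (pvDiffWitness_countSortedPoints.1) (pvDiffWitness_countSortedPoints.2) ∧ countSortedPoints (pvDiffWitness_countSortedPoints.1) (pvDiffWitness_countSortedPoints.2) = pvDiffWitnessOut_countSortedPoints.1 ∧ countSortedPoints_alt (pvDiffWitness_countSortedPoints.1) (pvDiffWitness_countSortedPoints.2) = pvDiffWitnessOut_countSortedPoints.2 ∧ pvDiffWitnessOut_countSortedPoints.1 ≠ pvDiffWitnessOut_countSortedPoints.2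
def Claim_exact_countSortedPoints : Prop := ∀ (arr : List Int) (N : Int), Dom_countSortedPoints arr N → Pre_countSortedPoints arr N → D_countSortedPoints arr N → countSortedPoints arr N ≠ countSortedPoints_alt arr N

-- ===== LEMMAS AND PROOFS =====

-- running prefix max / suffix min references
def pmFold (l : List Int) (M : Int) : Int := l.foldl (fun a x => max x a) M
def pmScan : List Int → Int → List Int
  | [], _ => []
  | a :: t, M => max a M :: pmScan t (max a M)
def smFold (l : List Int) (M : Int) : Int := l.foldr (fun x a => min x a) M
def smScan : List Int → Int → List Int
  | [], _ => []
  | a :: t, M => min a (smFold t M) :: smScan t M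

theorem smFold_append (l : List Int) (x M : Int) :
    smFold (l ++ [x]) M = smFold l (min x M) := by
  simp [smFold]

theorem smScan_append (l : List Int) (x M : Int) :
    smScan (l ++ [x]) M = smScan l (min x M) ++ [min x M] := by
  induction l with
  | nil => rfl
  | cons a t ih => simp [smScan, ih, smFold_append]

theorem pmScan_getD (l : List Int) (M : Int) (j : Nat) (hj : j < l.length) :
    (pmScan l M).getD j 0 = pmFold (l.take (j + 1)) M := by
  induction l generalizing M j with
  | nil => simp at hj
  | cons a t ih =>
    cases j with
    | zero => simp [pmScan, pmFold]
    | succ j =>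
      simp only [pmScan, List.getD_cons_succ, List.take_succ_cons]
      rw [ih _ j (by simpa using hj)]
      simp [pmFold]

theorem smScan_getD (l : List Int) (M : Int) (j : Nat) (hj : j < l.length) :
    (smScan l M).getD j 0 = smFold (l.drop j) M := by
  induction l generalizing j with
  | nil => simp at hj
  | cons a t ih =>
    cases j with
    | zero => simp [smScan, smFold]
    | succ j =>
      simp only [smScan, List.getD_cons_succ, List.drop_succ_cons]
      exact ih j (by simpa using hj)

theorem take_set_succ (L : List Int) (j : Nat) (m : Int) (h : j < L.length) :
    (L.set j m).take (j + 1) = L.take j ++ [m] := by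
  induction L generalizing j with
  | nil => simp at h
  | cons a t ih =>
    cases j with
    | zero => simp
    | succ j => simp [ih j (by simpa using h)]

theorem drop_set_self (L : List Int) (j : Nat) (m : Int) (h : j < L.length) :
    (L.set j m).drop j = m :: L.drop (j + 1) := by
  induction L generalizing j with
  | nil => simp at h
  | cons a t ih =>
    cases j with
    | zero => simp
    | succ j => simp [ih j (by simpa using h)]

-- A's first loop writes the prefix-max scan into `left`
theorem loopA1 (arr : List Int) (j k : Nat) (L : List Int) (M : Int)
    (hjk : j + k ≤ arr.length) (hL : j + k ≤ L.length) :
    (PySem.List.pyRange (j : Int) ((j : Int) + (k : Int)) 1).foldl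
      (fun (s : Int × List Int) i =>
        let Max := max (PySem.List.pyGetD arr i 0) s.1
        (Max, PySem.List.pySetD s.2 i Max)) (M, L)
    = (pmFold ((arr.drop j).take k) M,
       L.take j ++ pmScan ((arr.drop j).take k) M ++ L.drop (j + k)) := by
  induction k generalizing j M L with
  | zero =>
    rw [PySem.List.pyRange_one_eq_nil (by omega)]
    simp [pmFold, pmScan]
  | succ k ih =>
    rw [PySem.List.pyRange_one_cons (by omega)]
    have hj : j < arr.length := by omega
    have hdrop : arr.drop j = arr[j] :: arr.drop (j + 1) :=
      (List.getElem_cons_drop hj).symm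
    simp only [List.foldl_cons]
    have hget : PySem.List.pyGetD arr (j : Int) 0 = arr[j] := by
      rw [PySem.List.pyGetD_natCast]; exact List.getD_eq_getElem _ _ hj
    have hset : PySem.List.pySetD L (j : Int) (max arr[j] M) = L.set j (max arr[j] M) := by
      rw [PySem.List.pySetD_natCast]
    rw [hget, hset]
    have : ((j : Int) + 1) = ((j + 1 : Nat) : Int) := by push_cast; ring
    rw [this]
    have : ((j : Int) + ((k + 1 : Nat) : Int)) = ((j + 1 : Nat) : Int) + (k : Int) := by
      push_cast; ring
    rw [this, ih (j + 1) (L.set j (max arr[j] M)) (max arr[j] M) (by omega)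
      (by rw [List.length_set]; omega)]
    rw [hdrop]
    simp only [List.take_succ_cons, pmScan, pmFold, List.foldl_cons, Prod.mk.injEq]
    refine ⟨trivial, ?_⟩
    rw [take_set_succ L j _ (by omega), List.drop_set_of_lt (by omega : j < j + 1 + k)]
    have hjk1 : j + 1 + k = j + (k + 1) := by omega
    rw [hjk1]
    simp

-- A's second loop writes the suffix-min scan into `right`
theorem loopA2 (arr : List Int) (k : Nat) (L : List Int) (M : Int)
    (hk : k ≤ arr.length) (hL : k ≤ L.length) :
    (PySem.List.pyRange ((k : Int) - 1) (-1) (-1)).foldl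
      (fun (s : Int × List Int) i =>
        let Min := min (PySem.List.pyGetD arr i 0) s.1
        (Min, PySem.List.pySetD s.2 i Min)) (M, L)
    = (smFold (arr.take k) M, smScan (arr.take k) M ++ L.drop k) := by
  induction k generalizing M L with
  | zero =>
    rw [PySem.List.pyRange_neg_one_eq_nil (by omega)]
    simp [smFold, smScan]
  | succ k ih =>
    rw [PySem.List.pyRange_neg_one_cons (by push_cast; omega)]
    have hkl : k < arr.length := by omega
    simp only [List.foldl_cons]
    have e1 : ((k + 1 : Nat) : Int) - 1 = (k : Int) := by push_cast; ring
    rw [e1]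
    have hget : PySem.List.pyGetD arr (k : Int) 0 = arr[k] := by
      rw [PySem.List.pyGetD_natCast]; exact List.getD_eq_getElem _ _ hkl
    have hset : PySem.List.pySetD L (k : Int) (min arr[k] M) = L.set k (min arr[k] M) := by
      rw [PySem.List.pySetD_natCast]
    rw [hget, hset, ih (L.set k (min arr[k] M)) (min arr[k] M) (by omega)
      (by rw [List.length_set]; omega)]
    have htake : arr.take (k + 1) = arr.take k ++ [arr[k]] := by
      rw [List.take_add_one, List.getElem?_eq_getElem hkl]; rfl
    rw [htake, smFold_append, smScan_append, Prod.mk.injEq]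
    refine ⟨rfl, ?_⟩
    rw [drop_set_self L k _ (by omega)]
    simp

theorem pm_le_iff (l : List Int) (M c : Int) :
    pmFold l M ≤ c ↔ M ≤ c ∧ ∀ x ∈ l, x ≤ c := by
  induction l generalizing M with
  | nil => simp [pmFold]
  | cons a t ih =>
    have : pmFold (a :: t) M = pmFold t (max a M) := rfl
    rw [this, ih]
    simp
    tauto

theorem sm_ge_iff (l : List Int) (M c : Int) :
    c ≤ smFold l M ↔ c ≤ M ∧ ∀ y ∈ l, c ≤ y := by
  induction l with
  | nil => simp [smFold]
  | cons a t ih =>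
    have : smFold (a :: t) M = min a (smFold t M) := rfl
    rw [this, le_min_iff, ih]
    simp
    tauto

-- characterization of A's per-index test: prefix-max ≤ capped suffix-min
theorem Acond_iff (arr : List Int) (N : Int) (k : Nat)
    (hdom : ∀ x ∈ arr, -2147483648 ≤ x)
    (hpre : N ≤ (arr.length : Int)) (hk : (k : Int) < N - 1) :
    (PySem.List.pyGetD (pmScan (arr.take N.toNat) pvINT_MIN) (k : Int) 0 ≤
       PySem.List.pyGetD (smScan (arr.take N.toNat) pvINT_MAX) ((k : Int) + 1) 0)
    ↔ (∀ x ∈ arr.take (k + 1),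
         x ≤ 2147483647 ∧ ∀ y ∈ (arr.drop (k + 1)).take (N.toNat - (k + 1)), x ≤ y) := by
  have hn1 : k + 1 < N.toNat := by omega
  have hlen : (arr.take N.toNat).length = N.toNat := by
    rw [List.length_take]; omega
  have e1 : ((k : Int) + 1) = ((k + 1 : Nat) : Int) := by push_cast; ring
  rw [PySem.List.pyGetD_natCast, e1, PySem.List.pyGetD_natCast,
    pmScan_getD _ _ _ (by omega), smScan_getD _ _ _ (by omega)]
  have htt : (arr.take N.toNat).take (k + 1) = arr.take (k + 1) := by
    rw [List.take_take]; congr 1; omega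
  have hdt : (arr.take N.toNat).drop (k + 1) = (arr.drop (k + 1)).take (N.toNat - (k + 1)) := by
    rw [List.drop_take]
  rw [htt, hdt]
  set S := (arr.drop (k + 1)).take (N.toNat - (k + 1)) with hS
  have hSarr : ∀ y ∈ S, y ∈ arr := fun y hy =>
    List.mem_of_mem_drop (List.mem_of_mem_take hy)
  rw [pm_le_iff]
  constructor
  · rintro ⟨-, h⟩ x hx
    have := h x hx
    rw [sm_ge_iff] at this
    exact ⟨this.1, this.2⟩
  · intro h
    constructor
    · rw [sm_ge_iff]
      refine ⟨by norm_num [pvINT_MAX, pvINT_MIN], fun y hy => ?_⟩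
      have := hdom y (hSarr y hy)
      simp only [pvINT_MIN]
      omega
    · intro x hx
      rw [sm_ge_iff]
      exact ⟨(h x hx).1, (h x hx).2⟩

-- reduce port A to a countP over the split range
theorem A_eq_countP (arr : List Int) (N : Int) (h0 : 0 < N)
    (hpre : N ≤ (arr.length : Int)) :
    countSortedPoints arr N =
      ((PySem.List.pyRange 0 (N - 1) 1).countP (fun i => decide
        (PySem.List.pyGetD (pmScan (arr.take N.toNat) pvINT_MIN) i 0 ≤
         PySem.List.pyGetD (smScan (arr.take N.toNat) pvINT_MAX) (i + 1) 0)) : Int) := by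
  unfold countSortedPoints
  set n := N.toNat with hndef
  have hn : N = ((n : Nat) : Int) := by omega
  have hnlen : n ≤ arr.length := by omega
  have hzlen : ((PySem.List.pyRange 0 N 1).map (fun _ => (0:Int))).length = n := by
    simp [PySem.List.length_pyRange_one]; omega
  rw [hn]
  have hA1 := loopA1 arr 0 n ((PySem.List.pyRange 0 ((n : Nat) : Int) 1).map (fun _ => 0))
    pvINT_MIN (by omega) (by simp [PySem.List.length_pyRange_one])
  have hA2 := loopA2 arr n ((PySem.List.pyRange 0 ((n : Nat) : Int) 1).map (fun _ => 0))
    pvINT_MAX hnlen (by simp [PySem.List.length_pyRange_one])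
  simp only [Nat.cast_zero, zero_add, List.drop_zero, List.take_zero,
    List.nil_append] at hA1
  rw [List.drop_eq_nil_of_le (by simp [PySem.List.length_pyRange_one])] at hA1
  rw [List.append_nil] at hA1
  rw [List.drop_eq_nil_of_le (by simp [PySem.List.length_pyRange_one])] at hA2
  rw [List.append_nil] at hA2
  rw [← hn] at hA1 hA2 ⊢
  simp only [hA1, hA2]
  rw [PySem.List.foldl_ite_add_one
    (fun i => PySem.List.pyGetD (pmScan (arr.take n) pvINT_MIN) i 0 ≤
              PySem.List.pyGetD (smScan (arr.take n) pvINT_MAX) (i + 1) 0)]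
  simp [hndef]

-- reduce port B to a countP over the split range
theorem B_eq_countP (arr : List Int) (N : Int) :
    countSortedPoints_alt arr N =
      ((PySem.List.pyRange 0 (N - 1) 1).countP (fun i =>
        (PySem.List.slice arr none (some (i + 1))).all
          (fun x => (PySem.List.slice arr (some (i + 1)) (some N)).all
            (fun y => decide (x ≤ y)))) : Int) := by
  unfold countSortedPoints_alt
  rw [PySem.List.foldl_if_add_one]
  simp

-- B's per-index test, as the plain quantifier over take/drop
theorem Bcond_iff (arr : List Int) (N : Int) (k : Nat) (h0 : 0 ≤ N) :
    ((PySem.List.slice arr none (some ((k : Int) + 1))).all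
      (fun x => (PySem.List.slice arr (some ((k : Int) + 1)) (some N)).all
        (fun y => decide (x ≤ y))) = true)
    ↔ (∀ x ∈ arr.take (k + 1),
         ∀ y ∈ (arr.drop (k + 1)).take (N.toNat - (k + 1)), x ≤ y) := by
  have e1 : ((k : Int) + 1) = ((k + 1 : Nat) : Int) := by push_cast; ring
  rw [e1, PySem.List.slice_to_natCast,
    PySem.List.slice_toNat arr (by positivity) h0]
  have : (((k + 1 : Nat) : Int)).toNat = k + 1 := by omega
  rw [this]
  simp

-- strict countP inequality from a pointwise implication plus one strict witness
theorem countP_lt_of_witness {α : Type} (l : List α) (p q : α → Bool)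
    (h : ∀ x ∈ l, p x = true → q x = true) (x0 : α) (hx : x0 ∈ l)
    (hq : q x0 = true) (hp : ¬ p x0 = true) :
    l.countP p < l.countP q := by
  induction l with
  | nil => simp at hx
  | cons a t ih =>
    rw [List.countP_cons, List.countP_cons]
    rcases List.mem_cons.1 hx with rfl | hxt
    · have h1 : t.countP p ≤ t.countP q :=
        List.countP_mono_left (fun x hxm => h x (List.mem_cons_of_mem _ hxm))
      rw [if_neg hp, if_pos hq]; omega
    · have h1 := ih (fun x hxm => h x (List.mem_cons_of_mem _ hxm)) hxt
      have h2 : (if p a = true then 1 else 0) ≤ (if q a = true then 1 else 0) := by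
        by_cases hpa : p a = true
        · rw [if_pos hpa, if_pos (h a (List.mem_cons_self) hpa)]
        · rw [if_neg hpa]; split <;> omega
      omega

-- a valid split whose prefix holds an element above INT_MAX forces D_
theorem D_of_pair (arr : List Int) (N : Int)
    (hdom : ∀ x ∈ arr, x ≤ 2147483648)
    (hpre : N ≤ (arr.length : Int)) (k : Nat) (hk : (k : Int) < N - 1)
    (hcond : ∀ x ∈ arr.take (k + 1),
       ∀ y ∈ (arr.drop (k + 1)).take (N.toNat - (k + 1)), x ≤ y)
    (x : Int) (hx : x ∈ arr.take (k + 1)) (hxb : 2147483647 < x) :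
    D_countSortedPoints arr N := by
  have hN2 : 2 ≤ N := by omega
  set L := N.toNat with hL
  have hLlen : L ≤ arr.length := by omega
  have hla : (arr.take L).length = L := by rw [List.length_take]; omega
  have hk1 : k + 1 < L := by omega
  have hxa : x ∈ arr := List.mem_of_mem_take hx
  have hx31 : x = 2147483648 := by have := hdom x hxa; omega
  have hlast : L - 1 < (arr.take L).length := by omega
  have hdropL : (arr.take L).drop (L - 1) = [(arr.take L)[L - 1]] := by
    rw [← List.getElem_cons_drop hlast]
    congr 1
    rw [List.drop_eq_nil_of_le]
    omega
  have hymem : (arr.take L)[L - 1] ∈ (arr.drop (k + 1)).take (L - (k + 1)) := by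
    rw [← List.drop_take]
    have h1 : (arr.take L).drop (L - 1) = ((arr.take L).drop (k + 1)).drop (L - 1 - (k + 1)) := by
      rw [List.drop_drop]; congr 1; omega
    refine List.mem_of_mem_drop (i := L - 1 - (k + 1)) ?_
    rw [← h1, hdropL]
    exact List.mem_singleton_self _
  have hy := hcond x hx _ hymem
  have hya : (arr.take L)[L - 1] ∈ arr :=
    List.mem_of_mem_take (List.getElem_mem hlast)
  have hy31 : (arr.take L)[L - 1] = 2147483648 := by
    have := hdom _ hya; omega
  refine ⟨hN2, by rw [hdropL, hy31], ?_⟩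
  have htt : arr.take (k + 1) = (arr.take (L - 1)).take (k + 1) := by
    rw [List.take_take]; congr 1; omega
  rw [hx31] at hx
  rw [htt] at hx
  exact List.mem_of_mem_take hx

-- D_ yields a concrete valid split with an over-INT_MAX prefix element
theorem pair_of_D (arr : List Int) (N : Int)
    (hdom : ∀ x ∈ arr, x ≤ 2147483648)
    (_hpre : N ≤ (arr.length : Int)) (hd : D_countSortedPoints arr N) :
    ∃ k : Nat, (k : Int) < N - 1 ∧
      (∀ x ∈ arr.take (k + 1),
         ∀ y ∈ (arr.drop (k + 1)).take (N.toNat - (k + 1)), x ≤ y) ∧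
      ∃ x ∈ arr.take (k + 1), 2147483647 < x := by
  obtain ⟨hN2, hlast, hmem⟩ := hd
  set L := N.toNat with hL
  refine ⟨L - 2, by omega, ?_, 2147483648, ?_, by norm_num⟩
  · have he1 : L - 2 + 1 = L - 1 := by omega
    rw [he1]
    intro x hx y hy
    rw [← List.drop_take] at hy
    rw [hlast] at hy
    rw [List.mem_singleton] at hy
    subst hy
    exact hdom x (List.mem_of_mem_take hx)
  · have he1 : L - 2 + 1 = L - 1 := by omega
    rw [he1]
    exact hmem

-- ===== VERDICT (by name: the statement is the Claim_ definition above) =====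
theorem countSortedPoints_spec : Claim_unchanged_countSortedPoints := by
  intro arr N hdom hpre hnd
  by_cases hN : N ≤ 0
  · unfold countSortedPoints countSortedPoints_alt
    rw [PySem.List.pyRange_one_eq_nil (by omega : N - 1 ≤ 0),
        PySem.List.pyRange_neg_one_eq_nil (by omega : N - 1 ≤ -1)]
    simp
  · rw [A_eq_countP arr N (by omega) hpre, B_eq_countP arr N]
    congr 1
    apply List.countP_congr
    intro i hi
    rw [PySem.List.mem_pyRange_one] at hi
    obtain ⟨hi0, hi1⟩ := hi
    have hk : i = ((i.toNat : Nat) : Int) := by omega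
    set k := i.toNat with hkdef
    have hdom' : ∀ x ∈ arr, -2147483648 ≤ x ∧ x ≤ 2147483648 := by
      unfold Dom_countSortedPoints at hdom
      simp only [Bool.and_eq_true, List.all_eq_true, pvDomInt, decide_eq_true_eq] at hdom
      exact fun x hx => hdom.1 x hx
    rw [hk, decide_eq_true_iff,
      Acond_iff arr N k (fun x hx => (hdom' x hx).1) hpre (by omega),
      Bcond_iff arr N k (by omega)]
    constructor
    · exact fun h x hx y hy => (h x hx).2 y hy
    · intro h x hx
      refine ⟨?_, h x hx⟩
      by_contra hxb
      rw [not_le] at hxb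
      exact hnd (D_of_pair arr N (fun z hz => (hdom' z hz).2) hpre k (by omega) h x hx hxb)

theorem countSortedPoints_changed : Claim_changed_countSortedPoints := by
  unfold Claim_changed_countSortedPoints; decide

theorem countSortedPoints_tight : Claim_exact_countSortedPoints := by
  intro arr N hdom hpre hd
  have hdom' : ∀ x ∈ arr, -2147483648 ≤ x ∧ x ≤ 2147483648 := by
    unfold Dom_countSortedPoints at hdom
    simp only [Bool.and_eq_true, List.all_eq_true, pvDomInt, decide_eq_true_eq] at hdom
    exact fun x hx => hdom.1 x hx
  obtain ⟨k, hkN, hall, x0, hx0, hx0b⟩ :=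
    pair_of_D arr N (fun z hz => (hdom' z hz).2) hpre hd
  have h0 : 0 < N := by omega
  rw [A_eq_countP arr N h0 hpre, B_eq_countP arr N]
  have hlt := countP_lt_of_witness (PySem.List.pyRange 0 (N - 1) 1)
    (fun i => decide
      (PySem.List.pyGetD (pmScan (arr.take N.toNat) pvINT_MIN) i 0 ≤
       PySem.List.pyGetD (smScan (arr.take N.toNat) pvINT_MAX) (i + 1) 0))
    (fun i =>
      (PySem.List.slice arr none (some (i + 1))).all
        (fun x => (PySem.List.slice arr (some (i + 1)) (some N)).all
          (fun y => decide (x ≤ y))))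
    ?_ ((k : Int)) (by rw [PySem.List.mem_pyRange_one]; omega) ?_ ?_
  · intro he
    have hlt' : ((PySem.List.pyRange 0 (N - 1) 1).countP (fun i => decide
        (PySem.List.pyGetD (pmScan (arr.take N.toNat) pvINT_MIN) i 0 ≤
         PySem.List.pyGetD (smScan (arr.take N.toNat) pvINT_MAX) (i + 1) 0)) : Int) <
      ((PySem.List.pyRange 0 (N - 1) 1).countP (fun i =>
        (PySem.List.slice arr none (some (i + 1))).all
          (fun x => (PySem.List.slice arr (some (i + 1)) (some N)).all
            (fun y => decide (x ≤ y)))) : Int) := by exact_mod_cast hlt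
    omega
  · -- pointwise: A's test implies B's test
    intro i hi hpa
    rw [PySem.List.mem_pyRange_one] at hi
    have hk' : i = ((i.toNat : Nat) : Int) := by omega
    rw [hk'] at hpa ⊢
    rw [decide_eq_true_iff,
      Acond_iff arr N i.toNat (fun z hz => (hdom' z hz).1) hpre (by omega)] at hpa
    rw [Bcond_iff arr N i.toNat (by omega)]
    exact fun x hx y hy => (hpa x hx).2 y hy
  · -- B's test holds at the witness index
    rw [Bcond_iff arr N k (by omega)]
    exact hall
  · -- A's test fails at the witness index: some prefix element exceeds INT_MAX
    rw [decide_eq_true_iff,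
      Acond_iff arr N k (fun z hz => (hdom' z hz).1) hpre (by omega)]
    intro h
    have := (h x0 hx0).1
    omega
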